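-- pv_equiv track=rewrite | github.com/dwood1/Projects | Python/TemporalFeatures/Features.py | dx_min
-- ===== SOURCE A (Python) =====
-- def dx_min(input_array, interval):
--     output_array = [1 for i in input_array]
--     l = len(input_array)
--     for t in range(l):
--         if(t-interval >= 0):
--             temp_list = [input_array[i+1] - input_array[i] for i in range(t-interval, t)]
--             output_array[t] = min(temp_list)
--     return output_array
-- ===== SOURCE B (Python) =====
-- def dx_min(input_array, interval):
--     # Sliding-window minimum of consecutive differences via the two-stack
--     # amortized-O(1) queue-min: diffs computed once, each pushed/popped once.
--     l = len(input_array)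
--     out = [1] * l
--     diffs = [b - a for a, b in zip(input_array, input_array[1:])]
--     instack = []   # (value, min of this and everything below)
--     outstack = []
--     for t in range(l):
--         if t >= 1:
--             d = diffs[t - 1]
--             m = d if not instack else min(d, instack[-1][1])
--             instack.append((d, m))
--         if t > interval:
--             if not outstack:
--                 while instack:
--                     v, _ = instack.pop()
--                     m = v if not outstack else min(v, outstack[-1][1])
--                     outstack.append((v, m))
--             outstack.pop()
--         if t >= interval:
--             cands = []
--             if instack:
--                 cands.append(instack[-1][1])
--             if outstack:
--                 cands.append(outstack[-1][1])
--             out[t] = min(cands)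
--     return out
-- ===== Notes on version B (the rewrite author's own statement) =====
-- stated objective: faster
-- what changed: B computes the consecutive differences once and maintains a two-stack amortized queue-minimum over the sliding window, instead of rebuilding the difference window and scanning it with min() for every index.
import Mathlib
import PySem

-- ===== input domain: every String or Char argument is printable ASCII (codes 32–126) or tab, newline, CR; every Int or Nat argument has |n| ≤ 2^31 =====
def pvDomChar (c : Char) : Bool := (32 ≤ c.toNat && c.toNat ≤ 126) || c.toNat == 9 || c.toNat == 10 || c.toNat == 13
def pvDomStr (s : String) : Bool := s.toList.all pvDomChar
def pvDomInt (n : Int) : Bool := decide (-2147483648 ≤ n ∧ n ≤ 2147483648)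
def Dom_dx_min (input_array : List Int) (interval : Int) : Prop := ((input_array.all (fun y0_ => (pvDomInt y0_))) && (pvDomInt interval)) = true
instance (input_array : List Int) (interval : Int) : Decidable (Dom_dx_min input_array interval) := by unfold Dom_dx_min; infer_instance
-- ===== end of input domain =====

-- B computes the differences once and keeps a two-stack amortized queue-minimum over the
-- sliding window instead of rebuilding and scanning each window; proved equal to A on Pre_.


-- ===== PORT A =====
-- loop body of A's 'for t in range(l)' (kept as a named helper; same steps as the Python)
def aStep (input_array : List Int) (interval : Int) (output_array : List Int) (t : Nat) : List Int :=
  if (t : Int) - interval ≥ 0 then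
    -- temp_list = [input_array[i+1] - input_array[i] for i in range(t-interval, t)]
    let temp_list := (PySem.List.pyRange ((t : Int) - interval) (t : Int) 1).map
      (fun i => PySem.List.pyGetD input_array (i + 1) 0 - PySem.List.pyGetD input_array i 0)
    -- output_array[t] = min(temp_list); min([]) raises ValueError (none), excluded by Pre_
    match PySem.List.min? temp_list (fun x => x) with
    | some m => output_array.set t m
    | none => output_array
  else output_array

def dx_min (input_array : List Int) (interval : Int) : List Int :=
  let output_array := input_array.map (fun _ => (1 : Int))
  let l := input_array.length
  (List.range l).foldl (aStep input_array interval) output_array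

-- ===== PORT B =====
-- Source B's inner 'while instack: …' dump loop (Python list-as-stack; head of the Lean list = top)
def dumpStack : List (Int × Int) → List (Int × Int) → List (Int × Int)
  | [], outs => outs
  | (v, _) :: ins, outs =>
      dumpStack ins ((v, if outs.isEmpty then v else min v ((outs.headD (0, 0)).2)) :: outs)

-- 'if t >= 1: … instack.append((d, m))'
def bPush (diffs : List Int) (ins : List (Int × Int)) (t : Nat) : List (Int × Int) :=
  if 1 ≤ t then
    (diffs.getD (t - 1) 0,
      if ins.isEmpty then diffs.getD (t - 1) 0
      else min (diffs.getD (t - 1) 0) ((ins.headD (0, 0)).2)) :: ins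
  else ins

-- 'if t > interval: (refill outstack when empty) then outstack.pop()'
def bEvict (interval : Int) (t : Nat) (ins outs : List (Int × Int)) :
    List (Int × Int) × List (Int × Int) :=
  if interval < (t : Int) then
    if outs.isEmpty then (([] : List (Int × Int)), (dumpStack ins []).tail)
    else (ins, outs.tail)
  else (ins, outs)

-- 'if t >= interval: out[t] = min(cands)'; min([]) raises ValueError, excluded by Pre_
def bRead (interval : Int) (t : Nat) (out : List Int) (ins outs : List (Int × Int)) : List Int :=
  if interval ≤ (t : Int) then
    out.set t ((PySem.List.min?
      ((if ins.isEmpty then ([] : List Int) else [(ins.headD (0, 0)).2]) ++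
       (if outs.isEmpty then ([] : List Int) else [(outs.headD (0, 0)).2])) (fun x => x)).getD 1)
  else out

-- loop body of Source B's 'for t in range(l)'; state = (out, instack, outstack)
def bStep (diffs : List Int) (interval : Int)
    (s : List Int × List (Int × Int) × List (Int × Int)) (t : Nat) :
    List Int × List (Int × Int) × List (Int × Int) :=
  let ins := bPush diffs s.2.1 t
  let p := bEvict interval t ins s.2.2
  (bRead interval t s.1 p.1 p.2, p.1, p.2)

def dx_min_alt (input_array : List Int) (interval : Int) : List Int :=
  let l := input_array.length
  let out := List.replicate l (1 : Int)
  let diffs := (input_array.zip (input_array.drop 1)).map (fun p => p.2 - p.1)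
  let st := (List.range l).foldl (bStep diffs interval)
    (out, ([] : List (Int × Int)), ([] : List (Int × Int)))
  st.1

-- ===== PRECONDITION & SPEC =====
-- A raises ValueError (min() of an empty window) whenever interval < 1 and the list is
-- nonempty; B's stacks are empty there too (its min([]) would raise as well), so exactly
-- those inputs are excluded.
def Pre_dx_min (input_array : List Int) (interval : Int) : Prop :=
  input_array = [] ∨ 1 ≤ interval
instance (input_array : List Int) (interval : Int) : Decidable (Pre_dx_min input_array interval) := by unfold Pre_dx_min; infer_instance

def pvWitness_dx_min : List Int × Int := ([3, 1, 4, 1, 5, 9, 2, 6], 2)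

def Spec_dx_min (input_array : List Int) (interval : Int) (out : List Int) : Prop := out = dx_min_alt input_array interval
instance (input_array : List Int) (interval : Int) (out : List Int) : Decidable (Spec_dx_min input_array interval out) := by unfold Spec_dx_min; infer_instance

-- ===== CLAIM (what is proved, stated in full; the proofs are below) =====
def Claim_equal_dx_min : Prop := ∀ (input_array : List Int) (interval : Int), Dom_dx_min input_array interval → Pre_dx_min input_array interval → Spec_dx_min input_array interval (dx_min input_array interval)

-- ===== LEMMAS AND PROOFS =====

-- the difference list, as B builds it
def dList (xs : List Int) : List Int := (xs.zip (xs.drop 1)).map (fun p => p.2 - p.1)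

-- the window of differences read at index t for window size k
def win (xs : List Int) (k t : Nat) : List Int := ((dList xs).take t).drop (t - k)

-- the value both programs store at index t
def fVal (xs : List Int) (k t : Nat) : Int :=
  if k ≤ t then (PySem.List.min? (win xs k t) (fun x => x)).getD 1 else 1

-- stack invariant: each entry's second component is the minimum of its value and all below
def goodStack : List (Int × Int) → Prop
  | [] => True
  | (v, m) :: rest => goodStack rest ∧ m = (rest.map Prod.fst).foldl min v

lemma length_dList (xs : List Int) : (dList xs).length = xs.length - 1 := by
  simp [dList]

lemma getElem_dList (xs : List Int) (i : Nat) (h : i < (dList xs).length) :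
    (dList xs)[i] = xs.getD (i + 1) 0 - xs.getD i 0 := by
  have hlen := length_dList xs
  have h1 : i + 1 < xs.length := by omega
  have h0 : i < xs.length := by omega
  simp [dList, List.getElem_zip, List.getD, h0, h1]

-- ((range l).map g).set n x rewritten as a map
lemma set_map_range (l n : Nat) (g : Nat → Int) (x : Int) (hn : n < l) :
    (((List.range l).map g).set n x) = (List.range l).map (fun t => if t = n then x else g t) := by
  apply List.ext_getElem
  · simp
  · intro i h1 h2
    rw [List.getElem_set]
    simp only [List.getElem_map, List.getElem_range]
    by_cases hi : i = n
    · simp [hi]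
    · rw [if_neg (by omega), if_neg hi]

lemma goodStack_top (v m : Int) (rest : List (Int × Int)) (h : goodStack ((v, m) :: rest)) :
    m ∈ v :: rest.map Prod.fst ∧ ∀ y ∈ v :: rest.map Prod.fst, m ≤ y := by
  obtain ⟨-, hm⟩ := h
  subst hm
  constructor
  · rcases PySem.List.foldl_min_mem (rest.map Prod.fst) v with h | h
    · simp [h]
    · simp [h]
  · intro y hy
    rcases List.mem_cons.1 hy with rfl | hy
    · exact (PySem.List.foldl_min_le _ _).1
    · exact (PySem.List.foldl_min_le _ _).2 y hy

lemma goodStack_push (d : Int) (ins : List (Int × Int)) (h : goodStack ins) :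
    goodStack ((d, if ins.isEmpty then d else min d ((ins.headD (0, 0)).2)) :: ins) := by
  cases ins with
  | nil => exact ⟨trivial, by simp⟩
  | cons e rest =>
    obtain ⟨v, m⟩ := e
    refine ⟨h, ?_⟩
    obtain ⟨-, hm⟩ := h
    subst hm
    simp [List.foldl_assoc]

lemma goodStack_tail (s : List (Int × Int)) (h : goodStack s) : goodStack s.tail := by
  cases s with
  | nil => trivial
  | cons e rest => exact h.1

lemma dumpStack_fst (ins : List (Int × Int)) : ∀ outs : List (Int × Int),
    (dumpStack ins outs).map Prod.fst = (ins.map Prod.fst).reverse ++ outs.map Prod.fst := by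
  induction ins with
  | nil => intro outs; simp [dumpStack]
  | cons e rest ih =>
    intro outs
    obtain ⟨v, m⟩ := e
    simp [dumpStack, ih]

lemma dumpStack_good (ins : List (Int × Int)) : ∀ outs : List (Int × Int),
    goodStack outs → goodStack (dumpStack ins outs) := by
  induction ins with
  | nil => intro outs h; exact h
  | cons e rest ih =>
    intro outs h
    obtain ⟨v, m⟩ := e
    exact ih _ (goodStack_push v outs h)

-- the candidate minimum read from the stack tops equals the minimum over the window
lemma cands_min (ins outs : List (Int × Int)) (W : List Int)
    (hW : outs.map Prod.fst ++ (ins.map Prod.fst).reverse = W)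
    (hins : goodStack ins) (houts : goodStack outs) (hne : W ≠ []) :
    PySem.List.min?
        ((if ins.isEmpty then ([] : List Int) else [(ins.headD (0, 0)).2]) ++
         (if outs.isEmpty then ([] : List Int) else [(outs.headD (0, 0)).2])) (fun x => x)
      = PySem.List.min? W (fun x => x) := by
  cases hmW : PySem.List.min? W (fun x => x) with
  | none => exact absurd ((PySem.List.min?_eq_none_iff W (fun x => x)).1 hmW) hne
  | some mW =>
    have hmWmem : mW ∈ W := PySem.List.min?_mem hmW
    have hmWmin : ∀ y ∈ W, mW ≤ y := by
      have := PySem.List.min?_isMin hmW; simpa using this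
    cases ins with
    | nil =>
      cases outs with
      | nil => exact absurd (by simpa using hW.symm) hne
      | cons e r =>
        obtain ⟨v, m⟩ := e
        have htop := goodStack_top v m r houts
        have hWeq : W = v :: r.map Prod.fst := by simpa using hW.symm
        have hmm : m = mW := by
          refine le_antisymm (htop.2 mW ?_) (hmWmin m ?_)
          · rw [hWeq] at hmWmem; exact hmWmem
          · rw [hWeq]; exact htop.1
        simpa [hmm] using PySem.List.min?_id_cons m []
    | cons ei ri =>
      obtain ⟨vi, mi⟩ := ei
      have hitop := goodStack_top vi mi ri hins
      cases outs with
      | nil =>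
        have hWeq : W = (vi :: ri.map Prod.fst).reverse := by simpa using hW.symm
        have hmm : mi = mW := by
          refine le_antisymm (hitop.2 mW ?_) (hmWmin mi ?_)
          · rw [hWeq] at hmWmem; exact List.mem_reverse.1 hmWmem
          · rw [hWeq]; exact List.mem_reverse.2 hitop.1
        simpa [hmm] using PySem.List.min?_id_cons mi []
      | cons eo ro =>
        obtain ⟨vo, mo⟩ := eo
        have hotop := goodStack_top vo mo ro houts
        have hWeq : W = (vo :: ro.map Prod.fst) ++ (vi :: ri.map Prod.fst).reverse := by
          simpa using hW.symm
        have hcmem : min mi mo ∈ W := by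
          rw [hWeq]
          rcases min_choice mi mo with h | h <;> rw [h]
          · exact List.mem_append_right _ (List.mem_reverse.2 hitop.1)
          · exact List.mem_append_left _ hotop.1
        have hcmin : ∀ y ∈ W, min mi mo ≤ y := by
          intro y hy
          rw [hWeq] at hy
          rcases List.mem_append.1 hy with hy | hy
          · exact le_trans (min_le_right mi mo) (hotop.2 y hy)
          · exact le_trans (min_le_left mi mo) (hitop.2 y (List.mem_reverse.1 hy))
        have hmm : min mi mo = mW :=
          le_antisymm (hcmin mW hmWmem) (hmWmin _ hcmem)
        simpa [hmm] using PySem.List.min?_id_cons mi [mo]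

-- length and nonemptiness of the window actually read
lemma length_win (xs : List Int) (k n : Nat) (hkn : k ≤ n) (hn : n < xs.length) :
    (win xs k n).length = k := by
  simp [win, length_dList]
  omega

lemma win_ne_nil (xs : List Int) (k n : Nat) (hk : 1 ≤ k) (hkn : k ≤ n) (hn : n < xs.length) :
    win xs k n ≠ [] := by
  intro hnil
  have := length_win xs k n hkn hn
  rw [hnil] at this
  simp at this
  omega

-- A's temp_list equals the window
lemma temp_eq (xs : List Int) (k n : Nat) (hkn : k ≤ n) (hn : n < xs.length) :
    (PySem.List.pyRange ((n : Int) - (k : Int)) (n : Int) 1).map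
        (fun i => PySem.List.pyGetD xs (i + 1) 0 - PySem.List.pyGetD xs i 0)
      = win xs k n := by
  rw [PySem.List.pyRange_one, List.map_map]
  have hcnt : ((n : Int) - ((n : Int) - (k : Int))).toNat = k := by omega
  apply List.ext_getElem
  · rw [List.length_map, List.length_range, hcnt, length_win xs k n hkn hn]
  · intro i h1 h2
    have hik : i < k := by
      rw [List.length_map, List.length_range, hcnt] at h1; exact h1
    simp only [List.getElem_map, List.getElem_range, Function.comp]
    have hidx1 : ((n : Int) - (k : Int)) + (i : Int) + 1 = ((n - k + i + 1 : Nat) : Int) := by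
      push_cast; omega
    have hidx : ((n : Int) - (k : Int)) + (i : Int) = ((n - k + i : Nat) : Int) := by
      push_cast; omega
    rw [hidx1, hidx]
    rw [PySem.List.pyGetD_natCast, PySem.List.pyGetD_natCast]
    have hdl : n - k + i < (dList xs).length := by rw [length_dList]; omega
    have hwin : (win xs k n)[i] = (dList xs)[n - k + i]'hdl := by
      simp only [win, List.getElem_drop, List.getElem_take]
    rw [hwin, getElem_dList xs (n - k + i) hdl]

-- a step of A when the window is read
lemma aStep_some (xs : List Int) (k : Nat) (out : List Int) (t : Nat) (m : Int)
    (hc : (t : Int) - (k : Int) ≥ 0)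
    (hm : PySem.List.min? ((PySem.List.pyRange ((t : Int) - (k : Int)) (t : Int) 1).map
        (fun i => PySem.List.pyGetD xs (i + 1) 0 - PySem.List.pyGetD xs i 0)) (fun x => x)
        = some m) :
    aStep xs (k : Int) out t = out.set t m := by
  unfold aStep
  rw [if_pos hc]
  simp only [hm]

lemma aStep_skip (xs : List Int) (k : Nat) (out : List Int) (t : Nat)
    (hc : ¬ ((t : Int) - (k : Int) ≥ 0)) :
    aStep xs (k : Int) out t = out := by
  unfold aStep
  rw [if_neg hc]

-- updating the table at index n
lemma table_update (xs : List Int) (k l n : Nat) (_hk : 1 ≤ k) (hkn : k ≤ n) (hnl : n < l) (m : Int)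
    (hm : PySem.List.min? (win xs k n) (fun x => x) = some m) :
    ((List.range l).map (fun t => if t < n then fVal xs k t else 1)).set n m
      = (List.range l).map (fun t => if t < n + 1 then fVal xs k t else 1) := by
  rw [set_map_range l n _ m hnl]
  apply List.map_congr_left
  intro t ht
  by_cases hteq : t = n
  · subst hteq
    rw [if_pos rfl, if_pos (by omega)]
    unfold fVal
    rw [if_pos hkn, hm]
    rfl
  · rw [if_neg hteq]
    by_cases htn : t < n
    · rw [if_pos htn, if_pos (by omega)]
    · rw [if_neg htn, if_neg (by omega)]

-- when index n is not read, the table is unchanged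
lemma table_skip (xs : List Int) (k l n : Nat) (hkn : ¬ k ≤ n) :
    ((List.range l).map (fun t => if t < n then fVal xs k t else 1))
      = (List.range l).map (fun t => if t < n + 1 then fVal xs k t else 1) := by
  apply List.map_congr_left
  intro t ht
  by_cases hteq : t = n
  · subst hteq
    rw [if_neg (by omega), if_pos (by omega)]
    unfold fVal
    rw [if_neg hkn]
  · by_cases htn : t < n
    · rw [if_pos htn, if_pos (by omega)]
    · rw [if_neg htn, if_neg (by omega)]

-- A's loop computes the fVal table
lemma A_loop (xs : List Int) (k : Nat) (hk : 1 ≤ k) (n : Nat) (hn : n ≤ xs.length) :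
    (List.range n).foldl (aStep xs (k : Int)) (xs.map (fun _ => (1 : Int)))
      = (List.range xs.length).map (fun t => if t < n then fVal xs k t else 1) := by
  induction n with
  | zero => simp [List.map_const']
  | succ n ih =>
    rw [List.range_succ, List.foldl_append, ih (by omega), List.foldl_cons, List.foldl_nil]
    have hnl : n < xs.length := by omega
    by_cases hkn : k ≤ n
    · cases hmin : PySem.List.min? (win xs k n) (fun x => x) with
      | none =>
        exact absurd ((PySem.List.min?_eq_none_iff _ _).1 hmin) (win_ne_nil xs k n hk hkn hnl)
      | some m =>
        rw [aStep_some xs k _ n m (by omega)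
            (by rw [temp_eq xs k n hkn hnl]; exact hmin)]
        exact table_update xs k xs.length n hk hkn hnl m hmin
    · rw [aStep_skip xs k _ n (by omega)]
      exact table_skip xs k xs.length n hkn

-- pushing diffs[n-1] extends the stack window at the back
lemma win_push (xs : List Int) (k n : Nat) (hn : n < xs.length) (h1 : 1 ≤ n) :
    ((dList xs).take (n - 1)).drop (n - 1 - k) ++ [(dList xs).getD (n - 1) 0]
      = ((dList xs).take n).drop (n - 1 - k) := by
  have hlt : n - 1 < (dList xs).length := by rw [length_dList]; omega
  rw [List.getD_eq_getElem _ _ hlt]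
  conv_rhs => rw [show n = (n - 1) + 1 by omega]
  rw [List.take_add_one, List.getElem?_eq_getElem hlt]
  rw [List.drop_append_of_le_length]
  · rfl
  · rw [List.length_take, length_dList]; omega

-- the push stage preserves the invariant
lemma bPush_spec (xs : List Int) (k n : Nat) (hn : n < xs.length)
    (ins outs : List (Int × Int))
    (hwin : outs.map Prod.fst ++ (ins.map Prod.fst).reverse
      = ((dList xs).take (n - 1)).drop (n - 1 - k))
    (hgi : goodStack ins) :
    outs.map Prod.fst ++ ((bPush (dList xs) ins n).map Prod.fst).reverse
        = ((dList xs).take n).drop (n - 1 - k)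
      ∧ goodStack (bPush (dList xs) ins n) := by
  unfold bPush
  by_cases h1 : 1 ≤ n
  · rw [if_pos h1]
    constructor
    · simp only [List.map_cons, List.reverse_cons]
      rw [← List.append_assoc, hwin, win_push xs k n hn h1]
    · exact goodStack_push _ ins hgi
  · rw [if_neg h1]
    have hn0 : n = 0 := by omega
    subst hn0
    exact ⟨by simpa using hwin, hgi⟩

-- the evict stage preserves the invariant
lemma bEvict_spec (xs : List Int) (k n : Nat) (_hk : 1 ≤ k) (_hn : n < xs.length)
    (ins outs : List (Int × Int))
    (hwin : outs.map Prod.fst ++ (ins.map Prod.fst).reverse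
      = ((dList xs).take n).drop (n - 1 - k))
    (hgi : goodStack ins) (hgo : goodStack outs) :
    (bEvict (k : Int) n ins outs).2.map Prod.fst
        ++ ((bEvict (k : Int) n ins outs).1.map Prod.fst).reverse
        = ((dList xs).take n).drop (n - k)
      ∧ goodStack (bEvict (k : Int) n ins outs).1 ∧ goodStack (bEvict (k : Int) n ins outs).2 := by
  unfold bEvict
  by_cases h2 : k < n
  · rw [if_pos (by omega)]
    have htail : (((dList xs).take n).drop (n - 1 - k)).tail
        = ((dList xs).take n).drop (n - k) := by
      rw [List.tail_drop]
      congr 1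
      omega
    cases outs with
    | nil =>
      rw [if_pos (by simp)]
      refine ⟨?_, trivial, goodStack_tail _ (dumpStack_good ins [] trivial)⟩
      rw [← htail, ← hwin]
      simp [List.map_tail, dumpStack_fst]
    | cons eo ro =>
      rw [if_neg (by simp)]
      refine ⟨?_, hgi, hgo.1⟩
      rw [← htail, ← hwin]
      simp
  · rw [if_neg (by omega)]
    refine ⟨?_, hgi, hgo⟩
    rw [hwin]
    congr 1
    omega

-- the read stage writes the window minimum
lemma bRead_spec (xs : List Int) (k n : Nat) (hk : 1 ≤ k) (hn : n < xs.length)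
    (ins outs : List (Int × Int))
    (hwin : outs.map Prod.fst ++ (ins.map Prod.fst).reverse = ((dList xs).take n).drop (n - k))
    (hgi : goodStack ins) (hgo : goodStack outs) :
    bRead (k : Int) n ((List.range xs.length).map (fun t => if t < n then fVal xs k t else 1))
        ins outs
      = (List.range xs.length).map (fun t => if t < n + 1 then fVal xs k t else 1) := by
  unfold bRead
  by_cases h3 : k ≤ n
  · rw [if_pos (by omega)]
    have hwinn : ((dList xs).take n).drop (n - k) = win xs k n := rfl
    rw [hwinn] at hwin
    have hne := win_ne_nil xs k n hk h3 hn
    rw [cands_min ins outs (win xs k n) hwin hgi hgo hne]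
    cases hmin : PySem.List.min? (win xs k n) (fun x => x) with
    | none => exact absurd ((PySem.List.min?_eq_none_iff _ _).1 hmin) hne
    | some m =>
      rw [Option.getD_some]
      exact table_update xs k xs.length n hk h3 hn m hmin
  · rw [if_neg (by omega)]
    exact table_skip xs k xs.length n h3

-- bStep unfolded into its three stages
lemma bStep_def (diffs : List Int) (interval : Int) (out : List Int)
    (ins outs : List (Int × Int)) (t : Nat) :
    bStep diffs interval (out, ins, outs) t
      = (bRead interval t out (bEvict interval t (bPush diffs ins t) outs).1
            (bEvict interval t (bPush diffs ins t) outs).2,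
         (bEvict interval t (bPush diffs ins t) outs).1,
         (bEvict interval t (bPush diffs ins t) outs).2) := rfl

-- B's loop invariant
lemma B_loop (xs : List Int) (k : Nat) (hk : 1 ≤ k) (n : Nat) (hn : n ≤ xs.length) :
    ∃ ins outs : List (Int × Int),
      (List.range n).foldl (bStep (dList xs) (k : Int))
          (List.replicate xs.length (1 : Int), ([] : List (Int × Int)), ([] : List (Int × Int)))
        = ((List.range xs.length).map (fun t => if t < n then fVal xs k t else 1), ins, outs)
      ∧ outs.map Prod.fst ++ (ins.map Prod.fst).reverse
          = ((dList xs).take (n - 1)).drop (n - 1 - k)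
      ∧ goodStack ins ∧ goodStack outs := by
  induction n with
  | zero =>
    refine ⟨[], [], ?_, by simp, trivial, trivial⟩
    simp [List.map_const']
  | succ n ih =>
    obtain ⟨ins, outs, hfold, hwin, hgi, hgo⟩ := ih (by omega)
    have hnl : n < xs.length := by omega
    obtain ⟨hwin1, hgi1⟩ := bPush_spec xs k n hnl ins outs hwin hgi
    obtain ⟨hwin2, hgi2, hgo2⟩ :=
      bEvict_spec xs k n hk hnl (bPush (dList xs) ins n) outs hwin1 hgi1 hgo
    refine ⟨(bEvict (k : Int) n (bPush (dList xs) ins n) outs).1,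
            (bEvict (k : Int) n (bPush (dList xs) ins n) outs).2, ?_, ?_, hgi2, hgo2⟩
    · rw [List.range_succ, List.foldl_append, hfold, List.foldl_cons, List.foldl_nil,
        bStep_def, bRead_spec xs k n hk hnl _ _ hwin2 hgi2 hgo2]
    · simp only [Nat.add_sub_cancel]
      exact hwin2

-- the ports as their loop normal forms
lemma dx_min_eq (xs : List Int) (i : Int) :
    dx_min xs i = (List.range xs.length).foldl (aStep xs i) (xs.map (fun _ => (1 : Int))) := rfl

lemma dx_min_alt_eq (xs : List Int) (i : Int) :
    dx_min_alt xs i = ((List.range xs.length).foldl (bStep (dList xs) i)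
      (List.replicate xs.length (1 : Int), ([] : List (Int × Int)), ([] : List (Int × Int)))).1 := rfl

-- ===== VERDICT (by name: the statement is the Claim_ definition above) =====
theorem dx_min_spec : Claim_equal_dx_min := by
  intro xs interval _ hpre
  unfold Spec_dx_min
  rcases hpre with rfl | hk
  · rfl
  · obtain ⟨k, rfl⟩ : ∃ k : Nat, interval = (k : Int) :=
      ⟨interval.toNat, (Int.toNat_of_nonneg (by omega)).symm⟩
    have hk1 : 1 ≤ k := by exact_mod_cast hk
    obtain ⟨ins, outs, hB, -, -, -⟩ := B_loop xs k hk1 xs.length le_rfl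
    rw [dx_min_eq, dx_min_alt_eq, hB, A_loop xs k hk1 xs.length le_rfl]
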